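-- pv_equiv track=rewrite | github.com/rndsantos/Typing-Game | utils.py | get_errors
-- ===== SOURCE A (Python) =====
-- def get_errors(text, typed_text):
--     """Gets type errors by the user
--
--     Parameters
--     ----------
--     text : str
--         The base text
--     typed_text : str
--         The text that the user typed
--
--     Returns
--     -------
--     int
--     """
--
--     # how far to look for the typed letter in the remaining text
--     # too far of a match will be considered an error
--     CHECK_THRESHOLD = 3
--     mistyped_characters = max(len(text), len(typed_text))
--
--     if typed_text == text:
--         return 0
--
--     if typed_text == "":
--         return mistyped_characters
--
--     # check if there is a match for every typed character in the base text,
--     # then subtract that letter from the mistyped_characters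
--     for typed_character in typed_text:
--         for character in text:
--             # there are some cases where the player skips a few letters
--             # to track that, check if the letter is found within the remaining text,
--             # if it is found and within the CHECK_THRESHOLD, skip the passed text and
--             # continue checking starting with the found letter
--             found = text.find(typed_character)
--             if typed_character == character or (
--                 found < CHECK_THRESHOLD and found != -1
--             ):
--                 mistyped_characters -= 1
--
--                 # cuts off already checked characters
--                 text = text[text.index(character) + 1 :]
--                 break
--
--             break
--
--     return mistyped_characters
-- ===== SOURCE B (Python) =====
-- def get_errors(text, typed_text):
--     """Gets type errors by the user (one pass: pointer into text, 3-char window)."""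
--     errors = max(len(text), len(typed_text))
--     i = 0
--     for c in typed_text:
--         if c in text[i:i + 3]:
--             errors -= 1
--             i += 1
--     return errors
-- ===== Notes on version B (the rewrite author's own statement) =====
-- stated objective: faster
-- what changed: A rescans the whole remaining text with str.find for every typed character (its inner loop always breaks on the first iteration); B keeps a pointer into text and tests each typed character against only the next 3-character window, one pass, no special cases.
import Mathlib
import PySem

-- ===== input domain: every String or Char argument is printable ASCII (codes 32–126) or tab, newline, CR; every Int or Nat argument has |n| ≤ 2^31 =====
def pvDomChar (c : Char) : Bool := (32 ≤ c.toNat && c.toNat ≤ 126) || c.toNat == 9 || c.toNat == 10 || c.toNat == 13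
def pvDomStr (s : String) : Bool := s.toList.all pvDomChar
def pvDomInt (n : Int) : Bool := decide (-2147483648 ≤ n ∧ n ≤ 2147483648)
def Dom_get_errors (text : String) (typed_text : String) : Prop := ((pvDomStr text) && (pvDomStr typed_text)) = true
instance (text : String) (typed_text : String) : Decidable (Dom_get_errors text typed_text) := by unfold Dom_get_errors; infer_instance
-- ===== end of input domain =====

-- B replaces A's per-character rescans of the whole remaining text (str.find) by a
-- single pass with a pointer and a fixed 3-character window: O(n*m) -> O(n+m).

-- ===== PORT A =====
-- A's inner 'for character in text' always breaks on its first iteration, so it is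
-- transliterated as an inspection of text's head; text.index(character) equals
-- text.find(character) here because character is text's head (always present),
-- so str.index never raises in A.
def geA_loop : List Char → List Char → Int → Int
  | [], _, mistyped => mistyped
  | typed_character :: rest, text, mistyped =>
    match text with
    | [] => geA_loop rest text mistyped
    | character :: ts =>
      let found := PySem.Chars.find (character :: ts) [typed_character]
      if typed_character = character ∨ (found < 3 ∧ found ≠ -1) then
        geA_loop rest
          (PySem.List.slice (character :: ts)
            (some (PySem.Chars.find (character :: ts) [character] + 1)) none)
          (mistyped - 1)
      else
        geA_loop rest (character :: ts) mistyped

def get_errors (text : String) (typed_text : String) : Int :=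
  let mistyped_characters : Int := (max text.toList.length typed_text.toList.length : Nat)
  if typed_text.toList = text.toList then 0
  else if typed_text.toList = [] then mistyped_characters
  else geA_loop typed_text.toList text.toList mistyped_characters

-- ===== PORT B =====
-- Source B: pointer i into text; 'c in text[i:i+3]' is the slice-membership test below.
def geB_loop : List Char → List Char → Nat → Int → Int
  | [], _, _, errors => errors
  | c :: rest, text, i, errors =>
    if c ∈ PySem.List.slice text (some (i : Int)) (some ((i + 3 : Nat) : Int)) then
      geB_loop rest text (i + 1) (errors - 1)
    else
      geB_loop rest text i errors

def get_errors_alt (text : String) (typed_text : String) : Int :=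
  geB_loop typed_text.toList text.toList 0
    ((max text.toList.length typed_text.toList.length : Nat) : Int)

-- ===== PRECONDITION & SPEC =====
def Spec_get_errors (text : String) (typed_text : String) (out : Int) : Prop := out = get_errors_alt text typed_text
instance (text : String) (typed_text : String) (out : Int) : Decidable (Spec_get_errors text typed_text out) := by unfold Spec_get_errors; infer_instance

-- ===== CLAIM (what is proved, stated in full; the proofs are below) =====
def Claim_equal_get_errors : Prop := ∀ (text : String) (typed_text : String), Dom_get_errors text typed_text → Spec_get_errors text typed_text (get_errors text typed_text)

-- ===== LEMMAS AND PROOFS =====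

theorem singleton_prefix_iff_head? (c : Char) (l : List Char) : [c] <+: l ↔ l.head? = some c := by
  cases l <;> simp [List.cons_prefix_cons, eq_comm]

theorem mem_take_iff_getElem? (c : Char) (l : List Char) (n : Nat) :
    c ∈ l.take n ↔ ∃ i, i < n ∧ l[i]? = some c := by
  simp only [List.mem_take_iff_getElem]
  constructor
  · rintro ⟨i, hi, h⟩; exact ⟨i, by omega, by rw [List.getElem?_eq_getElem (by omega)]; simp [h]⟩
  · rintro ⟨i, hi, h⟩
    have hl : i < l.length := by
      by_contra hc
      rw [List.getElem?_eq_none (by omega)] at h; simp at h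
    exact ⟨i, by omega, by rw [List.getElem?_eq_getElem hl] at h; simpa using h⟩

-- '0 ≤ text.find(c) < n' is exactly 'c occurs among the first n characters'
theorem find_single_lt_iff (l : List Char) (c : Char) (n : Nat) :
    (PySem.Chars.find l [c] < (n : Int) ∧ PySem.Chars.find l [c] ≠ -1) ↔ c ∈ l.take n := by
  constructor
  · rintro ⟨h1, h2⟩
    have hnn : 0 ≤ PySem.Chars.find l [c] := by
      have := PySem.Chars.find_nonneg_iff l [c]
      rw [this, ← PySem.Chars.find_ne_neg_one_iff]; exact h2
    obtain ⟨hp, -⟩ := PySem.Chars.find_spec (s := l) (sub := [c]) hnn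
    rw [singleton_prefix_iff_head?, List.head?_drop] at hp
    rw [mem_take_iff_getElem?]
    exact ⟨(PySem.Chars.find l [c]).toNat, by omega, hp⟩
  · intro hm
    obtain ⟨j, hj, hget⟩ := (mem_take_iff_getElem? c l n).mp hm
    have hinf : [c] <:+: l := by
      rw [List.singleton_infix_iff]
      exact (List.take_subset n l) hm
    have hnn : 0 ≤ PySem.Chars.find l [c] := (PySem.Chars.find_nonneg_iff l [c]).mpr hinf
    obtain ⟨-, hmin⟩ := PySem.Chars.find_spec (s := l) (sub := [c]) hnn
    refine ⟨?_, by omega⟩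
    by_contra hge
    have : ¬ [c] <+: l.drop j := hmin j (by omega)
    rw [singleton_prefix_iff_head?, List.head?_drop] at this
    exact this hget

theorem find_head (c : Char) (l : List Char) : PySem.Chars.find (c :: l) [c] = 0 := by
  have hnn : 0 ≤ PySem.Chars.find (c :: l) [c] :=
    (PySem.Chars.find_nonneg_iff _ _).mpr (by rw [List.singleton_infix_iff]; simp)
  obtain ⟨-, hmin⟩ := PySem.Chars.find_spec (s := c :: l) (sub := [c]) hnn
  by_contra h
  have h0 : ¬ [c] <+: (c :: l).drop 0 := hmin 0 (by omega)
  simp [List.cons_prefix_cons] at h0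

-- B's window test text[i:i+3] is a take-3 of the suffix
theorem geB_window (t : List Char) (i : Nat) (c : Char) :
    (c ∈ PySem.List.slice t (some (i : Int)) (some ((i + 3 : Nat) : Int))) ↔
      c ∈ (t.drop i).take 3 := by
  rw [PySem.List.slice_natCast]
  have : i + 3 - i = 3 := by omega
  rw [this]

-- the simulation: A's shrinking text is B's suffix t.drop i
theorem loop_eq (typed : List Char) : ∀ (t : List Char) (i : Nat) (e : Int),
    geA_loop typed (t.drop i) e = geB_loop typed t i e := by
  induction typed with
  | nil => intro t i e; rfl
  | cons c rest ih =>
    intro t i e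
    rw [geB_loop]
    by_cases hw : c ∈ PySem.List.slice t (some (i : Int)) (some ((i + 3 : Nat) : Int))
    · have hm : c ∈ (t.drop i).take 3 := (geB_window t i c).mp hw
      obtain ⟨ch, ts, hd⟩ : ∃ ch ts, t.drop i = ch :: ts := by
        rcases hdrop : t.drop i with _ | ⟨ch, ts⟩
        · rw [hdrop] at hm; simp at hm
        · exact ⟨ch, ts, rfl⟩
      have hcond : c = ch ∨ (PySem.Chars.find (ch :: ts) [c] < 3 ∧
          PySem.Chars.find (ch :: ts) [c] ≠ -1) := by
        right
        have := (find_single_lt_iff (ch :: ts) c 3).mpr (by rw [← hd]; exact hm)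
        exact_mod_cast this
      rw [hd, geA_loop]
      simp only [hcond, if_pos, find_head]
      have hs : PySem.List.slice (ch :: ts) (some ((0 : Int) + 1)) none = ts := by
        norm_num [PySem.List.slice_from_one]
      rw [hs]
      have hts : ts = t.drop (i + 1) := by
        have htail : (t.drop i).tail = t.drop (i + 1) := List.tail_drop
        rw [hd] at htail; simpa using htail
      rw [hts, if_pos hw, ih]
    · rw [if_neg hw]
      have hrest : geA_loop rest (t.drop i) e = geB_loop rest t i e := ih t i e
      rcases hdrop : t.drop i with _ | ⟨ch, ts⟩
      · rw [hdrop] at hrest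
        simpa only [geA_loop] using hrest
      · have hm : c ∉ (t.drop i).take 3 := fun h => hw ((geB_window t i c).mpr h)
        rw [hdrop] at hm hrest
        have hcond : ¬ (c = ch ∨ (PySem.Chars.find (ch :: ts) [c] < 3 ∧
            PySem.Chars.find (ch :: ts) [c] ≠ -1)) := by
          rintro (rfl | hfind)
          · exact hm (by simp)
          · exact hm ((find_single_lt_iff (ch :: ts) c 3).mp (by exact_mod_cast hfind))
        simp only [geA_loop, hcond, if_false]
        exact hrest

-- when the typed text is exactly the remaining text, every step matches
theorem geB_copy (s : List Char) : ∀ (t : List Char) (i : Nat) (e : Int),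
    t.drop i = s → geB_loop s t i e = e - s.length := by
  induction s with
  | nil => intro t i e _; simp [geB_loop]
  | cons c rest ih =>
    intro t i e hd
    rw [geB_loop]
    have hw : c ∈ PySem.List.slice t (some (i : Int)) (some ((i + 3 : Nat) : Int)) := by
      rw [geB_window, hd]; simp
    rw [if_pos hw]
    have hts : t.drop (i + 1) = rest := by
      have htail : (t.drop i).tail = t.drop (i + 1) := List.tail_drop
      rw [hd] at htail; simpa using htail.symm
    rw [ih t (i + 1) (e - 1) hts]
    simp; omega

-- ===== VERDICT (by name: the statement is the Claim_ definition above) =====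
theorem get_errors_spec : Claim_equal_get_errors := by
  intro text typed_text _
  unfold Spec_get_errors get_errors get_errors_alt
  by_cases h1 : typed_text.toList = text.toList
  · rw [if_pos h1]
    rw [geB_copy typed_text.toList text.toList 0 _ (by simpa using h1.symm)]
    simp [h1]
  · rw [if_neg h1]
    by_cases h2 : typed_text.toList = []
    · rw [if_pos h2]; rw [h2]; rfl
    · rw [if_neg h2]
      have := loop_eq typed_text.toList text.toList 0
        ((max text.toList.length typed_text.toList.length : Nat) : Int)
      simpa using this
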